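-- pv_equiv track=rewrite | github.com/janwillemvl/advent_of_code_2021 | day_16/solve_16.py | parse_literal_value
-- ===== SOURCE A (Python) =====
-- def binary_to_decimal(binary):
--     result = 0
--     factor = 1
--     for bit in binary[::-1]:
--         if bit == '1':
--             result += factor
--         factor = factor * 2
--     return result
--
-- def parse_literal_value(content):
--     last_bits = False
--     read_bits = False
--     bit_count = 0
--     result = 0
--     bits = ''
--     unparsed = ''
--     for bit in content:
--         if read_bits:
--             bits += bit
--             bit_count += 1
--             if bit_count == 4:
--                 bit_count = 0
--                 read_bits = False
--         elif last_bits: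
--             unparsed += bit
--         elif bit == '1':
--             read_bits = True
--         elif bit == '0':
--             last_bits = True
--             read_bits = True
--     if len(bits) > 0:
--         result = binary_to_decimal(bits)
--     return result, unparsed
-- ===== SOURCE B (Python) =====
-- def parse_literal_value(content):
--     # Group-slicing reformulation: an index walks the string consuming whole
--     # 5-char groups (prefix + 4 data chars) via slices instead of A's
--     # per-character flag state machine; decimal value by left-to-right Horner.
--     bits = []
--     unparsed = ''
--     i = 0
--     n = len(content)
--     while i < n:
--         c = content[i]
--         if c == '0':
--             bits.append(content[i + 1:i + 5])
--             unparsed = content[i + 5:]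
--             break
--         elif c == '1':
--             bits.append(content[i + 1:i + 5])
--             i += 5
--         else:
--             i += 1
--     result = 0
--     for ch in ''.join(bits):
--         result = result * 2 + (ch == '1')
--     return result, unparsed
-- ===== Notes on version B (the rewrite author's own statement) =====
-- stated objective: simpler
-- what changed: Replaces A's per-character four-flag state machine with an index loop that slices whole 5-char groups (prefix + 4 data chars) and takes the remainder as one tail slice, and computes the decimal value by left-to-right Horner folding instead of A's reversed-string factor loop.
import Mathlib
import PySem

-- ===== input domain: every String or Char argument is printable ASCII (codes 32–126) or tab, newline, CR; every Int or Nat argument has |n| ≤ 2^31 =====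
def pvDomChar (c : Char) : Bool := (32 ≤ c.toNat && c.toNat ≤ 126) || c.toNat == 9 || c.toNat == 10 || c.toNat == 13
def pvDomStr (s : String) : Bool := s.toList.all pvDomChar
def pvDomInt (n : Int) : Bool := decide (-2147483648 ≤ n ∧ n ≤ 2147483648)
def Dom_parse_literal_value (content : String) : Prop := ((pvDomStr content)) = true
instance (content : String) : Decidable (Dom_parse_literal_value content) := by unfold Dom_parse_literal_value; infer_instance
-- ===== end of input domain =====

-- B replaces A's per-character flag state machine by whole-group slicing and a
-- Horner fold for the decimal value (objective: simpler).

-- ===== PORT A =====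
-- binary[::-1] is the reverse of the string (PySem.List.slice?_none_none_neg_one);
-- we fold over binary.reverse as Python iterates the reversed character sequence.
def binary_to_decimal (binary : List Char) : Int :=
  (binary.reverse.foldl
    (fun (st : Int × Int) bit =>
      let result := if bit = '1' then st.1 + st.2 else st.1
      (result, st.2 * 2)) (0, 1)).1

-- one step of A's for-loop; state = (last_bits, read_bits, bit_count, bits, unparsed)
def stepA (st : Bool × Bool × Int × List Char × List Char) (bit : Char) :
    Bool × Bool × Int × List Char × List Char :=
  let (last_bits, read_bits, bit_count, bits, unparsed) := st
  if read_bits then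
    let bits := bits ++ [bit]
    let bit_count := bit_count + 1
    if bit_count = 4 then (last_bits, false, 0, bits, unparsed)
    else (last_bits, true, bit_count, bits, unparsed)
  else if last_bits then (last_bits, read_bits, bit_count, bits, unparsed ++ [bit])
  else if bit = '1' then (last_bits, true, bit_count, bits, unparsed)
  else if bit = '0' then (true, true, bit_count, bits, unparsed)
  else (last_bits, read_bits, bit_count, bits, unparsed)

def parse_literal_value (content : String) : Int × String :=
  let st := content.toList.foldl stepA (false, false, 0, [], [])
  let bits := st.2.2.2.1
  let unparsed := st.2.2.2.2
  let result : Int := if bits.length > 0 then binary_to_decimal bits else 0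
  (result, String.ofList unparsed)

-- ===== PORT B =====
-- B's while-loop; the index i into content is rendered as the remaining list
-- rest = content[i:], so content[i+1:i+5] on a nonempty rest c::t is t.take 4
-- and content[i+5:] is t.drop 4 (PySem.List.slice with natural bounds);
-- returns (collected data bits, unparsed remainder).
def loopB : List Char → List Char → List Char × List Char
  | [], bits => (bits, [])
  | c :: t, bits =>
    if c = '0' then (bits ++ t.take 4, t.drop 4)
    else if c = '1' then loopB (t.drop 4) (bits ++ t.take 4)
    else loopB t bits
termination_by rest _ => rest.length
decreasing_by
  all_goals simp

def parse_literal_value_alt (content : String) : Int × String :=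
  let p := loopB content.toList []
  let result := p.1.foldl (fun (r : Int) ch => r * 2 + (if ch = '1' then 1 else 0)) 0
  (result, String.ofList p.2)

-- ===== PRECONDITION & SPEC =====
def Spec_parse_literal_value (content : String) (out : Int × String) : Prop := out = parse_literal_value_alt content
instance (content : String) (out : Int × String) : Decidable (Spec_parse_literal_value content out) := by unfold Spec_parse_literal_value; infer_instance

-- ===== CLAIM (what is proved, stated in full; the proofs are below) =====
def Claim_equal_parse_literal_value : Prop := ∀ (content : String), Dom_parse_literal_value content → Spec_parse_literal_value content (parse_literal_value content)

-- ===== LEMMAS AND PROOFS =====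

-- LSB-first value of a bit list
def bitVal : List Char → Int
  | [] => 0
  | c :: t => (if c = '1' then 1 else 0) + 2 * bitVal t

theorem b2d_aux (xs : List Char) : ∀ (r f : Int),
    xs.foldl (fun (st : Int × Int) bit =>
      let result := if bit = '1' then st.1 + st.2 else st.1
      (result, st.2 * 2)) (r, f) = (r + f * bitVal xs, f * 2 ^ xs.length) := by
  induction xs with
  | nil => intro r f; simp [bitVal]
  | cons c t ih =>
    intro r f
    simp only [List.foldl_cons, ih, bitVal, List.length_cons, Prod.mk.injEq]
    constructor
    · split <;> ring
    · ring

theorem bitVal_append (xs : List Char) (c : Char) :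
    bitVal (xs ++ [c]) = bitVal xs + (if c = '1' then 1 else 0) * 2 ^ xs.length := by
  induction xs with
  | nil => simp [bitVal]
  | cons d t ih => simp only [List.cons_append, bitVal, ih, List.length_cons]; ring

theorem horner_eq (xs : List Char) : ∀ (acc : Int),
    xs.foldl (fun (r : Int) ch => r * 2 + (if ch = '1' then 1 else 0)) acc
      = acc * 2 ^ xs.length + bitVal xs.reverse := by
  induction xs with
  | nil => intro acc; simp [bitVal]
  | cons c t ih =>
    intro acc
    simp only [List.foldl_cons, ih, List.reverse_cons, bitVal_append,
      List.length_reverse, List.length_cons]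
    ring

theorem b2d_eq_horner (xs : List Char) :
    binary_to_decimal xs
      = xs.foldl (fun (r : Int) ch => r * 2 + (if ch = '1' then 1 else 0)) 0 := by
  unfold binary_to_decimal
  rw [b2d_aux, horner_eq]
  simp

-- A's fold after a terminating ('0'-prefixed) group appends everything to unparsed
theorem foldA_after (cs : List Char) : ∀ (bits unp : List Char),
    cs.foldl stepA (true, false, 0, bits, unp) = (true, false, 0, bits, unp ++ cs) := by
  induction cs with
  | nil => intro bits unp; simp
  | cons c t ih =>
    intro bits unp
    simp only [List.foldl_cons, stepA]
    simp only [Bool.false_eq_true, if_false, if_true]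
    rw [ih]
    simp

-- A's fold while reading: with j = 4 - bit_count bits still to read, the next
-- min j cs.length characters go to bits
theorem foldA_read (cs : List Char) : ∀ (j : ℕ) (lb : Bool) (bits unp : List Char),
    1 ≤ j → j ≤ 4 →
    cs.foldl stepA (lb, true, (4 : Int) - j, bits, unp) =
      if cs.length < j then (lb, true, (4 : Int) - ((j : Int) - cs.length), bits ++ cs, unp)
      else (cs.drop j).foldl stepA (lb, false, 0, bits ++ cs.take j, unp) := by
  induction cs with
  | nil =>
    intro j lb bits unp h1 _
    simp [show 0 < j from h1]
  | cons c t ih =>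
    intro j lb bits unp h1 h4
    have hj1 : (1 : Int) ≤ (j : Int) := by exact_mod_cast h1
    simp only [List.foldl_cons, stepA]
    by_cases hj : j = 1
    · subst hj
      have h14 : (4 : Int) - ((1 : ℕ) : Int) + 1 = 4 := by norm_num
      rw [if_pos h14]
      have hlen : ¬ (c :: t).length < 1 := by simp
      rw [if_neg hlen]
      simp [List.take, List.drop]
    · have hj2 : 2 ≤ j := by omega
      have harith : ¬ ((4 : Int) - (j : Int) + 1 = 4) := by omega
      rw [if_neg harith]
      have harith2 : (4 : Int) - (j : Int) + 1 = 4 - ((j - 1 : ℕ) : Int) := by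
        push_cast [Nat.cast_sub (by omega : 1 ≤ j)]
        ring
      rw [harith2]
      simp only [if_true]
      rw [ih (j - 1) lb (bits ++ [c]) unp (by omega) (by omega)]
      by_cases hc : t.length < j - 1
      · rw [if_pos hc, if_pos (by simp; omega)]
        have hcast : (4 : Int) - (((j - 1 : ℕ) : Int) - t.length)
            = 4 - ((j : Int) - (c :: t).length) := by
          push_cast [Nat.cast_sub (by omega : 1 ≤ j)]
          simp
          ring
        rw [hcast]
        simp
      · rw [if_neg hc, if_neg (by simp; omega)]
        have hdrop : t.drop (j - 1) = (c :: t).drop j := by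
          cases j with
          | zero => omega
          | succ k => simp [List.drop]
        have htake : bits ++ [c] ++ t.take (j - 1) = bits ++ (c :: t).take j := by
          cases j with
          | zero => omega
          | succ k => simp [List.take]
        rw [hdrop, htake]

-- main invariant: the (bits, unparsed) components of A's fold from the start
-- state are exactly loopB
theorem foldA_start : ∀ (n : ℕ) (cs : List Char), cs.length ≤ n → ∀ (bits : List Char),
    (cs.foldl stepA (false, false, 0, bits, [])).2.2.2 = loopB cs bits := by
  intro n
  induction n with
  | zero =>
    intro cs hcs bits
    have : cs = [] := List.eq_nil_of_length_eq_zero (by omega)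
    subst this
    simp [loopB]
  | succ m ih =>
    intro cs hcs bits
    match cs with
    | [] => simp [loopB]
    | c :: t =>
      by_cases hc0 : c = '0'
      · subst hc0
        simp only [List.foldl_cons, stepA]
        rw [if_neg (by simp), if_neg (by simp), if_neg (by decide), if_pos trivial]
        have hr := foldA_read t 4 true bits [] (by omega) (by omega)
        norm_num at hr
        rw [hr]
        by_cases ht : t.length < 4
        · rw [if_pos ht]
          have h1 : t.take 4 = t := List.take_of_length_le (by omega)
          have hd : t.drop 4 = [] := List.drop_eq_nil_of_le (by omega)
          simp [loopB, h1, hd]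
        · rw [if_neg ht, foldA_after]
          simp [loopB]
      · by_cases hc1 : c = '1'
        · subst hc1
          simp only [List.foldl_cons, stepA]
          rw [if_neg (by simp), if_neg (by simp), if_pos trivial]
          have hr := foldA_read t 4 false bits [] (by omega) (by omega)
          norm_num at hr
          rw [hr]
          by_cases ht : t.length < 4
          · rw [if_pos ht]
            have h1 : t.take 4 = t := List.take_of_length_le (by omega)
            have hd : t.drop 4 = [] := List.drop_eq_nil_of_le (by omega)
            simp [loopB, h1, hd]
          · rw [if_neg ht]
            rw [ih (t.drop 4) (by simp at hcs ⊢; omega) (bits ++ t.take 4)]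
            simp [loopB]
        · simp only [List.foldl_cons, stepA]
          rw [if_neg (by simp), if_neg (by simp), if_neg hc1, if_neg hc0]
          rw [ih t (by simp at hcs; omega) bits]
          simp [loopB, hc0, hc1]

-- ===== VERDICT (by name: the statement is the Claim_ definition above) =====
theorem parse_literal_value_spec : Claim_equal_parse_literal_value := by
  intro content _
  unfold Spec_parse_literal_value parse_literal_value parse_literal_value_alt
  simp only
  have h := foldA_start content.toList.length content.toList (le_refl _) []
  rw [show (content.toList.foldl stepA (false, false, 0, [], [])).2.2.2.1
      = (loopB content.toList []).1 by rw [h],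
    show (content.toList.foldl stepA (false, false, 0, [], [])).2.2.2.2
      = (loopB content.toList []).2 by rw [h]]
  rw [b2d_eq_horner]
  by_cases hb : (loopB content.toList []).1.length > 0
  · rw [if_pos hb]
  · rw [if_neg hb]
    have : (loopB content.toList []).1 = [] := by
      cases hx : (loopB content.toList []).1 with
      | nil => rfl
      | cons a l => rw [hx] at hb; simp at hb
    rw [this]
    simp
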